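-- pv_equiv track=rewrite | github.com/EliFrun/my-leetcode-submissions | submissions/3876-transform-array-to-all-equal-elements/solution.py | canMakeEqual
-- ===== SOURCE A (Python) =====
-- from typing import List
--
-- def canMakeEqual(nums: List[int], k: int) -> bool:
--     for v in [-1, 1]:
--         ret = 0
--         prev = -1
--         for i, val in enumerate(nums):
--             if val == v:
--                 if prev == -1:
--                     prev = i
--                 else:
--                     ret += i - prev
--                     prev = -1
--
--         if ret <= k and prev == -1:
--             return True
--     return False
-- ===== SOURCE B (Python) =====
-- from typing import List
--
-- def _pair_cost(idxs):
--     cost = 0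
--     while len(idxs) >= 2:
--         cost += idxs[1] - idxs[0]
--         idxs = idxs[2:]
--     return cost
--
-- def canMakeEqual(nums: List[int], k: int) -> bool:
--     for v in (-1, 1):
--         idxs = [i for i, x in enumerate(nums) if x == v]
--         if len(idxs) % 2 == 0 and _pair_cost(idxs) <= k:
--             return True
--     return False
-- ===== Notes on version B (the rewrite author's own statement) =====
-- stated objective: alternative
-- what changed: Replaces A's single-pass sentinel-state pairing (prev/-1 flag carried through one enumerate loop) by a two-phase decomposition: first materialize the list of matching indices, then an explicit parity check and a separate two-at-a-time pass over that index list summing pair gaps.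
import Mathlib
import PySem

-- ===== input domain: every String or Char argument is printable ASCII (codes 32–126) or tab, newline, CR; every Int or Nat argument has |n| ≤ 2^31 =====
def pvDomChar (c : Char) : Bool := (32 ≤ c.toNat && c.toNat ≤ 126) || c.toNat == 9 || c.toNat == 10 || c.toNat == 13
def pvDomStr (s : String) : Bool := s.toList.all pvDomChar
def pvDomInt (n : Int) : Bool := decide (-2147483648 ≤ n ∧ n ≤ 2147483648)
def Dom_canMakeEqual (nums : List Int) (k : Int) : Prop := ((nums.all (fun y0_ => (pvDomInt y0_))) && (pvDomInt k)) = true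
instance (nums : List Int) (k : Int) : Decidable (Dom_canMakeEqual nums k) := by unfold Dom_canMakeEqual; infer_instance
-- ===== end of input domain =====

-- B replaces A's single-pass sentinel pairing by: build the index list, check parity, then a
-- separate two-at-a-time pass over it; same O(n) cost (objective: alternative decomposition).

-- ===== PORT A =====
-- the inner 'for i, val in enumerate(nums)' loop carrying (ret, prev)
def pvLoopA (v : Int) : List (Int × Int) → Int → Int → Int × Int
  | [], ret, prev => (ret, prev)
  | (i, val) :: rest, ret, prev =>
    if val == v then
      if prev == -1 then pvLoopA v rest ret i
      else pvLoopA v rest (ret + (i - prev)) (-1)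
    else pvLoopA v rest ret prev

-- one iteration of the outer 'for v in [-1, 1]' loop (its 'return True' test)
def pvCheckA (nums : List Int) (k v : Int) : Bool :=
  let r := pvLoopA v (PySem.List.enumerate nums 0) 0 (-1)
  decide (r.1 ≤ k) && (r.2 == -1)

def canMakeEqual (nums : List Int) (k : Int) : Bool :=
  pvCheckA nums k (-1) || pvCheckA nums k 1

-- ===== PORT B =====
-- _pair_cost: while len(idxs) >= 2: cost += idxs[1] - idxs[0]; idxs = idxs[2:]
def pairCost : List Int → Int
  | a :: b :: rest => (b - a) + pairCost rest
  | _ => 0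

-- one iteration of B's outer loop: build idxs, parity check, pair-cost test
def pvCheckB (nums : List Int) (k v : Int) : Bool :=
  let idxs := ((PySem.List.enumerate nums 0).filter (fun p => p.2 == v)).map (·.1)
  (idxs.length % 2 == 0) && decide (pairCost idxs ≤ k)

def canMakeEqual_alt (nums : List Int) (k : Int) : Bool :=
  pvCheckB nums k (-1) || pvCheckB nums k 1

-- ===== PRECONDITION & SPEC =====
def Spec_canMakeEqual (nums : List Int) (k : Int) (out : Bool) : Prop := out = canMakeEqual_alt nums k
instance (nums : List Int) (k : Int) (out : Bool) : Decidable (Spec_canMakeEqual nums k out) := by unfold Spec_canMakeEqual; infer_instance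

-- ===== CLAIM (what is proved, stated in full; the proofs are below) =====
def Claim_equal_canMakeEqual : Prop := ∀ (nums : List Int) (k : Int), Dom_canMakeEqual nums k → Spec_canMakeEqual nums k (canMakeEqual nums k)

-- ===== LEMMAS AND PROOFS =====

-- indices of entries matching v, as B builds them
def idxsOf (v : Int) (l : List (Int × Int)) : List Int :=
  (l.filter (fun p => p.2 == v)).map (·.1)

-- the loop invariant: A's (ret, prev) state is determined by the matching-index list,
-- with the pending index p (or none, encoded -1) prepended
theorem loopA_char (v : Int) : ∀ (l : List (Int × Int)) (ret p : Int),
    (∀ q ∈ l, 0 ≤ q.1) → (p = -1 ∨ 0 ≤ p) →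
    (pvLoopA v l ret p).1 = ret + pairCost ((if p = -1 then [] else [p]) ++ idxsOf v l) ∧
    ((pvLoopA v l ret p).2 == -1)
      = (((if p = -1 then [] else [p]) ++ idxsOf v l).length % 2 == 0) := by
  intro l
  induction l with
  | nil =>
    intro ret p _ hs
    by_cases hp : p = -1
    · simp [pvLoopA, idxsOf, pairCost, hp]
    · rcases hs with h | h
      · exact absurd h hp
      · simp [pvLoopA, idxsOf, pairCost, hp]
  | cons q rest ih =>
    intro ret p hp hs
    obtain ⟨i, val⟩ := q
    have hi : (0:Int) ≤ i := hp (i, val) (by simp)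
    have hrest : ∀ q ∈ rest, (0:Int) ≤ q.1 := fun q hq => hp q (by simp [hq])
    by_cases hv : val = v
    · by_cases hpm : p = -1
      · -- pending becomes i
        have := ih ret i hrest (Or.inr hi)
        simp only [pvLoopA, hv, hpm, beq_self_eq_true, if_pos]
        simpa [idxsOf, hpm, pairCost, show ¬ i = -1 by omega] using this
      · -- pair (p, i), pending cleared
        rcases hs with h | hnn
        · exact absurd h hpm
        have := ih (ret + (i - p)) (-1) hrest (Or.inl rfl)
        simp only [pvLoopA, hv, beq_self_eq_true, if_true,
          show (p == -1) = false by simp [hpm], Bool.false_eq_true, if_false]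
        constructor
        · rw [this.1]; simp [idxsOf, hpm, pairCost]; ring
        · rw [this.2]
          simp only [idxsOf, hpm, if_false, List.filter_cons, beq_self_eq_true, if_true,
            List.map_cons, List.nil_append, List.cons_append, List.length_cons]
          congr 1
          omega
    · have := ih ret p hrest hs
      simp only [pvLoopA, show (val == v) = false by simp [hv], Bool.false_eq_true, if_false]
      simpa [idxsOf, hv] using this

theorem check_eq (nums : List Int) (k v : Int) : pvCheckA nums k v = pvCheckB nums k v := by
  have hp : ∀ q ∈ PySem.List.enumerate nums 0, (0:Int) ≤ q.1 := by
    intro q hq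
    rw [PySem.List.mem_enumerate_iff] at hq
    obtain ⟨j, hj, rfl⟩ := hq
    simp
  have h := loopA_char v (PySem.List.enumerate nums 0) 0 (-1) hp (Or.inl rfl)
  simp only [reduceIte, List.nil_append, zero_add] at h
  simp only [pvCheckA, pvCheckB]
  rw [h.1, h.2]
  simp only [idxsOf]
  exact Bool.and_comm _ _

-- ===== VERDICT (by name: the statement is the Claim_ definition above) =====
theorem canMakeEqual_spec : Claim_equal_canMakeEqual := by
  intro nums k _
  unfold Spec_canMakeEqual canMakeEqual canMakeEqual_alt
  rw [check_eq, check_eq]
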